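-- pv_equiv track=rewrite | github.com/ZeroQuest/CS-assignments | cs2500/fibonacci.py | naive_matrix_mult
-- ===== SOURCE A (Python) =====
-- def naive_matrix_mult(S, P):
--     a = len(S)
--     b = len(S[0])
--     g = len(P)
--     h = len(P[0])
--
--     if b != g:
--         return -1
--
--     Q = [[0 for _ in range(h)] for _ in range(a)]
--     num_mult = 0
--
--     for m in range(a):
--         for r in range (h):
--             Q[m][r] = 0
--             for k in range(g):
--                 Q[m][r] += S[m][k] * P[k][r]
--                 num_mult += 1
--
--     #return Q #returns the fibonacci sequence result
--     return num_mult
-- ===== SOURCE B (Python) =====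
-- def naive_matrix_mult(S, P):
--     if len(S[0]) != len(P):
--         return -1
--     return len(S) * len(P[0]) * len(P)
-- ===== Notes on version B (the rewrite author's own statement) =====
-- stated objective: faster
-- what changed: Replaces the triple nested multiplication loop by the closed form a*h*g after the dimension check, since the returned multiplication count never depends on the matrix entries.
import Mathlib
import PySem

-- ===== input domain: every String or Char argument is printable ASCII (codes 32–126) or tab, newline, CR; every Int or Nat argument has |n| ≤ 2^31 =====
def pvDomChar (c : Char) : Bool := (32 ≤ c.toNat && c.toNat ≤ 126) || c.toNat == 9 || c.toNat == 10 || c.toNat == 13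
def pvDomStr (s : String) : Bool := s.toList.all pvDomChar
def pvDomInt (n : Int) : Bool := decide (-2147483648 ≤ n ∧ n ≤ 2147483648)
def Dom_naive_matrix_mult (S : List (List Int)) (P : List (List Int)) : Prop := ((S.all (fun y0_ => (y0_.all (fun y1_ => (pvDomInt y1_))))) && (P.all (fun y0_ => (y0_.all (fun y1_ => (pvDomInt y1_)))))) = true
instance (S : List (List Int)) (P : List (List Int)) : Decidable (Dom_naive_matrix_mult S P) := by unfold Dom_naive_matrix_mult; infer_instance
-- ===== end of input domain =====

-- B replaces A's triple nested counting loop by the closed form a*h*g after the dimension check (faster).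

-- ===== PORT A =====
-- Literal transliteration of A: the three nested loops carry the state (Q, num_mult);
-- out-of-range element accesses (impossible inside Pre_) read a default.
def naive_matrix_mult (S : List (List Int)) (P : List (List Int)) : Int :=
  let a := S.length
  let b := ((PySem.List.pyGet? S 0).getD []).length
  let g := P.length
  let h := ((PySem.List.pyGet? P 0).getD []).length
  if b ≠ g then -1
  else
    let Q : List (List Int) := (List.range a).map (fun _ => (List.range h).map (fun _ => (0 : Int)))
    let res :=
      (List.range a).foldl (fun (st : List (List Int) × Int) m =>
        (List.range h).foldl (fun (st : List (List Int) × Int) r =>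
          let st := (st.1.set m ((st.1.getD m []).set r 0), st.2)
          (List.range g).foldl (fun (st : List (List Int) × Int) k =>
            (st.1.set m ((st.1.getD m []).set r
                (((st.1.getD m []).getD r 0) + ((S.getD m []).getD k 0) * ((P.getD k []).getD r 0))),
             st.2 + 1)) st) st) (Q, 0)
    res.2

-- ===== PORT B =====
def naive_matrix_mult_alt (S : List (List Int)) (P : List (List Int)) : Int :=
  if S.headI.length ≠ P.length then -1
  else (S.length : Int) * (P.headI.length : Int) * (P.length : Int)

-- ===== PRECONDITION & SPEC =====
-- Exactly where Python A returns normally: S and P nonempty (S[0]/P[0]), and when the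
-- dimension check passes and the loops run, every accessed row is long enough.
def Pre_naive_matrix_mult (S : List (List Int)) (P : List (List Int)) : Prop :=
  S ≠ [] ∧ P ≠ [] ∧
  (S.headI.length = P.length →
    (P.headI.length = 0 ∨
      ((∀ row ∈ S, P.length ≤ row.length) ∧ (∀ row ∈ P, P.headI.length ≤ row.length))))
instance (S : List (List Int)) (P : List (List Int)) : Decidable (Pre_naive_matrix_mult S P) := by
  unfold Pre_naive_matrix_mult; infer_instance
def pvWitness_naive_matrix_mult : List (List Int) × List (List Int) :=
  ([[1, 2], [3, 4]], [[5, 6], [7, 8]])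
def Spec_naive_matrix_mult (S : List (List Int)) (P : List (List Int)) (out : Int) : Prop := out = naive_matrix_mult_alt S P
instance (S : List (List Int)) (P : List (List Int)) (out : Int) : Decidable (Spec_naive_matrix_mult S P out) := by unfold Spec_naive_matrix_mult; infer_instance

-- ===== CLAIM (what is proved, stated in full; the proofs are below) =====
def Claim_equal_naive_matrix_mult : Prop := ∀ (S : List (List Int)) (P : List (List Int)), Dom_naive_matrix_mult S P → Pre_naive_matrix_mult S P → Spec_naive_matrix_mult S P (naive_matrix_mult S P)

-- ===== LEMMAS AND PROOFS =====

-- A fold whose step raises the second component by a constant c raises it by c * length.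
theorem foldl_snd_const_add {α : Type} (step : (List (List Int) × Int) → α → (List (List Int) × Int))
    (c : Int) (h : ∀ st x, (step st x).2 = st.2 + c) :
    ∀ (l : List α) (st : List (List Int) × Int),
      (l.foldl step st).2 = st.2 + c * l.length := by
  intro l
  induction l with
  | nil => intro st; simp
  | cons x xs ih =>
    intro st
    simp only [List.foldl_cons, ih, h, List.length_cons]
    push_cast
    ring_nf

theorem headI_eq_getD (S : List (List Int)) :
    S.headI = (PySem.List.pyGet? S 0).getD [] := by
  cases S <;> simp [PySem.List.pyGet?, PySem.List.pyIdx?]; rfl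

-- ===== VERDICT (by name: the statement is the Claim_ definition above) =====
theorem naive_matrix_mult_spec : Claim_equal_naive_matrix_mult := by
  intro S P _ _
  unfold Spec_naive_matrix_mult naive_matrix_mult naive_matrix_mult_alt
  rw [headI_eq_getD S, headI_eq_getD P]
  by_cases hbg : ((PySem.List.pyGet? S 0).getD []).length = P.length
  · simp only [hbg, ne_eq, not_true_eq_false, ite_false]
    have hinner : ∀ (m r : ℕ) (st : List (List Int) × Int),
        ((List.range P.length).foldl (fun (st : List (List Int) × Int) k =>
            (st.1.set m ((st.1.getD m []).set r
                (((st.1.getD m []).getD r 0) + ((S.getD m []).getD k 0) * ((P.getD k []).getD r 0))),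
             st.2 + 1)) st).2 = st.2 + 1 * (List.range P.length).length := by
      intro m r st
      exact foldl_snd_const_add _ 1 (by intro st x; rfl) _ st
    have hmid : ∀ (m : ℕ) (st : List (List Int) × Int),
        ((List.range ((PySem.List.pyGet? P 0).getD []).length).foldl (fun (st : List (List Int) × Int) r =>
          (List.range P.length).foldl (fun (st : List (List Int) × Int) k =>
            (st.1.set m ((st.1.getD m []).set r
                (((st.1.getD m []).getD r 0) + ((S.getD m []).getD k 0) * ((P.getD k []).getD r 0))),
             st.2 + 1)) (st.1.set m ((st.1.getD m []).set r 0), st.2)) st).2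
        = st.2 + (P.length : Int) * ((PySem.List.pyGet? P 0).getD []).length := by
      intro m st
      have := foldl_snd_const_add
        (fun (st : List (List Int) × Int) r =>
          (List.range P.length).foldl (fun (st : List (List Int) × Int) k =>
            (st.1.set m ((st.1.getD m []).set r
                (((st.1.getD m []).getD r 0) + ((S.getD m []).getD k 0) * ((P.getD k []).getD r 0))),
             st.2 + 1)) (st.1.set m ((st.1.getD m []).set r 0), st.2))
        (P.length) (by intro st r; simpa using hinner m r _)
        (List.range ((PySem.List.pyGet? P 0).getD []).length) st
      simpa using this
    have houter := foldl_snd_const_add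
      (fun (st : List (List Int) × Int) m =>
        (List.range ((PySem.List.pyGet? P 0).getD []).length).foldl (fun (st : List (List Int) × Int) r =>
          (List.range P.length).foldl (fun (st : List (List Int) × Int) k =>
            (st.1.set m ((st.1.getD m []).set r
                (((st.1.getD m []).getD r 0) + ((S.getD m []).getD k 0) * ((P.getD k []).getD r 0))),
             st.2 + 1)) (st.1.set m ((st.1.getD m []).set r 0), st.2)) st)
      ((P.length : Int) * ((PySem.List.pyGet? P 0).getD []).length)
      (by intro st m; exact hmid m st)
      (List.range S.length)
      ((List.range S.length).map (fun _ => (List.range ((PySem.List.pyGet? P 0).getD []).length).map (fun _ => (0 : Int))), 0)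
    simp only [List.length_range] at houter
    rw [houter]
    ring
  · simp [hbg]
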